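-- pv_equiv track=rewrite | github.com/techgenii/travelstyle | backend/app/services/orchestrator.py | _determine_message_type
-- ===== SOURCE A (Python) =====
-- def _determine_message_type(user_message: str) -> str:
--     """Rule-based message type determination for quick routing and tests."""
--     text = user_message.lower().strip()
--
--     # Action-style hints
--     if any(
--         token in text
--         for token in [
--             "currency_convert",
--             "currency_rate",
--             "currency",
--         ]
--     ):
--         return "currency"
--     if any(token in text for token in ["weather_info", "weather"]):
--         return "weather"
--     if any(token in text for token in ["wardrobe_planning", "wardrobe"]):
--         return "wardrobe"
--     if any(token in text for token in ["style_etiquette", "style"]):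
--         return "style"
--     if any(token in text for token in ["destination_info", "destination"]):
--         return "destination"
--
--     # Keyword heuristics
--     currency_keywords = [
--         "convert",
--         "exchange rate",
--         "rate",
--         "usd",
--         "eur",
--         "gbp",
--         "yen",
--         "jpy",
--     ]
--     if any(k in text for k in currency_keywords):
--         return "currency"
--
--     weather_keywords = ["weather", "temperature", "forecast", "rain", "sunny"]
--     if any(k in text for k in weather_keywords):
--         return "weather"
--
--     wardrobe_keywords = ["pack", "packing", "what should i pack", "outfit"]
--     if any(k in text for k in wardrobe_keywords):
--         return "wardrobe"
--
--     style_keywords = ["dress code", "fashion", "etiquette", "style"]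
--     if any(k in text for k in style_keywords):
--         return "style"
--
--     destination_keywords = ["tell me about", "going to", "visiting", "trip to"]
--     if any(k in text for k in destination_keywords):
--         return "destination"
--
--     logistics_keywords = ["visa", "vaccination", "itinerary", "logistics", "preparation"]
--     if any(k in text for k in logistics_keywords):
--         return "logistics"
--
--     return "general"
-- ===== SOURCE B (Python) =====
-- # Multi-pattern substring matching done the other way round: instead of searching the text
-- # once per keyword, scan each position of the text once and hash-look the window up in a
-- # keyword -> rule-priority dictionary built once; the answer is the label of the smallest
-- # matched priority.
--
-- _RULES = [
--     (["currency_convert", "currency_rate", "currency"], "currency"),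
--     (["weather_info", "weather"], "weather"),
--     (["wardrobe_planning", "wardrobe"], "wardrobe"),
--     (["style_etiquette", "style"], "style"),
--     (["destination_info", "destination"], "destination"),
--     (["convert", "exchange rate", "rate", "usd", "eur", "gbp", "yen", "jpy"], "currency"),
--     (["weather", "temperature", "forecast", "rain", "sunny"], "weather"),
--     (["pack", "packing", "what should i pack", "outfit"], "wardrobe"),
--     (["dress code", "fashion", "etiquette", "style"], "style"),
--     (["tell me about", "going to", "visiting", "trip to"], "destination"),
--     (["visa", "vaccination", "itinerary", "logistics", "preparation"], "logistics"),
-- ]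
--
-- _LABELS = [label for _, label in _RULES]
--
-- _KW_PRIO = {}
-- for _prio, (_kws, _label) in enumerate(_RULES):
--     for _kw in _kws:
--         if _kw not in _KW_PRIO:
--             _KW_PRIO[_kw] = _prio
--
-- _LENGTHS = sorted({len(_kw) for _kw in _KW_PRIO})
--
--
-- def _determine_message_type(user_message: str) -> str:
--     text = user_message.lower().strip()
--     n = len(text)
--     best = len(_LABELS)
--     for i in range(n):
--         for ln in _LENGTHS:
--             if i + ln > n:
--                 break
--             p = _KW_PRIO.get(text[i:i + ln])
--             if p is not None and p < best:
--                 best = p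
--     return _LABELS[best] if best < len(_LABELS) else "general"
-- ===== Notes on version B (the rewrite author's own statement) =====
-- stated objective: alternative
-- what changed: Replaced the per-keyword substring searches behind eleven if-branches by a multi-pattern matcher: a keyword-to-rule-priority dictionary built once, a single scan over the text's positions that hash-looks each window up and keeps the minimal matched priority, and a final label lookup by that priority.
import Mathlib
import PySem

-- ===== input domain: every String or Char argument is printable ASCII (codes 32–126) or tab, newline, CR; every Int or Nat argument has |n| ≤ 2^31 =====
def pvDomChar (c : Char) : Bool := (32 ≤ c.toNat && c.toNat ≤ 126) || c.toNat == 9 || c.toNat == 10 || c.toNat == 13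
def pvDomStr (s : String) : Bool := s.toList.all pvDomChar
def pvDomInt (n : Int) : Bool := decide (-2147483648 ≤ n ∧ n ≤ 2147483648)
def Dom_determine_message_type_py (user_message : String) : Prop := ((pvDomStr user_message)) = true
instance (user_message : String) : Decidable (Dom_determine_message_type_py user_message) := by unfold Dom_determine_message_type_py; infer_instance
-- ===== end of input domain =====

set_option maxRecDepth 16384
set_option maxHeartbeats 2000000


-- B replaces A's eleven per-keyword substring-search branches by a multi-pattern matcher:
-- a keyword→rule-priority dictionary built once, one scan over the text's positions that
-- looks each window up and keeps the minimal matched priority, then a label lookup.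
-- ===== PORT A =====
def determine_message_type_py (user_message : String) : String :=
  let text := PySem.Str.strip (PySem.Str.lower user_message)
  if ["currency_convert", "currency_rate", "currency"].any (fun token => PySem.Str.isIn token text) then "currency"
  else if ["weather_info", "weather"].any (fun token => PySem.Str.isIn token text) then "weather"
  else if ["wardrobe_planning", "wardrobe"].any (fun token => PySem.Str.isIn token text) then "wardrobe"
  else if ["style_etiquette", "style"].any (fun token => PySem.Str.isIn token text) then "style"
  else if ["destination_info", "destination"].any (fun token => PySem.Str.isIn token text) then "destination"
  else
    let currency_keywords := ["convert", "exchange rate", "rate", "usd", "eur", "gbp", "yen", "jpy"]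
    if currency_keywords.any (fun k => PySem.Str.isIn k text) then "currency"
    else
      let weather_keywords := ["weather", "temperature", "forecast", "rain", "sunny"]
      if weather_keywords.any (fun k => PySem.Str.isIn k text) then "weather"
      else
        let wardrobe_keywords := ["pack", "packing", "what should i pack", "outfit"]
        if wardrobe_keywords.any (fun k => PySem.Str.isIn k text) then "wardrobe"
        else
          let style_keywords := ["dress code", "fashion", "etiquette", "style"]
          if style_keywords.any (fun k => PySem.Str.isIn k text) then "style"
          else
            let destination_keywords := ["tell me about", "going to", "visiting", "trip to"]
            if destination_keywords.any (fun k => PySem.Str.isIn k text) then "destination"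
            else
              let logistics_keywords := ["visa", "vaccination", "itinerary", "logistics", "preparation"]
              if logistics_keywords.any (fun k => PySem.Str.isIn k text) then "logistics"
              else "general"

-- ===== PORT B =====
-- module-level tables of Source B
def pvRules : List (List String × String) :=
  [ (["currency_convert", "currency_rate", "currency"], "currency"),
    (["weather_info", "weather"], "weather"),
    (["wardrobe_planning", "wardrobe"], "wardrobe"),
    (["style_etiquette", "style"], "style"),
    (["destination_info", "destination"], "destination"),
    (["convert", "exchange rate", "rate", "usd", "eur", "gbp", "yen", "jpy"], "currency"),
    (["weather", "temperature", "forecast", "rain", "sunny"], "weather"),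
    (["pack", "packing", "what should i pack", "outfit"], "wardrobe"),
    (["dress code", "fashion", "etiquette", "style"], "style"),
    (["tell me about", "going to", "visiting", "trip to"], "destination"),
    (["visa", "vaccination", "itinerary", "logistics", "preparation"], "logistics") ]

def pvLabels : List String := pvRules.map (fun r => r.2)

-- the import-time loop 'for prio, (kws, _) in enumerate(_RULES): for kw in kws: …' (prio as Nat: enumerate indices are nonnegative)
def pvKwPrio : PySem.Dict String Nat :=
  (PySem.List.enumerate pvRules 0).foldl
    (fun d pr => pr.2.1.foldl (fun d kw => if d.contains kw then d else d.insert kw pr.1.toNat) d)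
    PySem.Dict.empty

-- _LENGTHS = sorted({len(kw) for kw in _KW_PRIO})
def pvLengths : List Nat :=
  PySem.List.sorted (PySem.Set.ofList (pvKwPrio.keys.map (fun k => k.toList.length))) (fun x => x) false

-- the inner 'for ln in _LENGTHS: … break …' loop; text[i:i+ln] with 0 ≤ i and i+ln ≤ n is
-- exactly (tl.drop i).take ln (PySem.List.slice_natCast_add)
def pvScanLens (tl : List Char) (n i : Nat) : List Nat → Nat → Nat
  | [], best => best
  | ln :: rest, best =>
      if i + ln > n then best
      else
        match pvKwPrio.get? (String.ofList ((tl.drop i).take ln)) with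
        | some p => pvScanLens tl n i rest (if p < best then p else best)
        | none => pvScanLens tl n i rest best

def determine_message_type_py_alt (user_message : String) : String :=
  let text := PySem.Str.strip (PySem.Str.lower user_message)
  let tl := text.toList
  let n := tl.length
  let best := (List.range n).foldl (fun best i => pvScanLens tl n i pvLengths best) pvLabels.length
  if best < pvLabels.length then pvLabels.getD best "general" else "general"

-- ===== PRECONDITION & SPEC =====
def Spec_determine_message_type_py (user_message : String) (out : String) : Prop := out = determine_message_type_py_alt user_message
instance (user_message : String) (out : String) : Decidable (Spec_determine_message_type_py user_message out) := by unfold Spec_determine_message_type_py; infer_instance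

-- ===== CLAIM (what is proved, stated in full; the proofs are below) =====
def Claim_equal_determine_message_type_py : Prop := ∀ (user_message : String), Dom_determine_message_type_py user_message → Spec_determine_message_type_py user_message (determine_message_type_py user_message)

-- ===== LEMMAS AND PROOFS =====

-- the keyword → priority table written out (pvKwPrio computes to exactly this dict)
def pvFlat : List (String × Nat) :=
  [ ("currency_convert", 0), ("currency_rate", 0), ("currency", 0),
    ("weather_info", 1), ("weather", 1),
    ("wardrobe_planning", 2), ("wardrobe", 2),
    ("style_etiquette", 3), ("style", 3),
    ("destination_info", 4), ("destination", 4),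
    ("convert", 5), ("exchange rate", 5), ("rate", 5), ("usd", 5), ("eur", 5), ("gbp", 5), ("yen", 5), ("jpy", 5),
    ("temperature", 6), ("forecast", 6), ("rain", 6), ("sunny", 6),
    ("pack", 7), ("packing", 7), ("what should i pack", 7), ("outfit", 7),
    ("dress code", 8), ("fashion", 8), ("etiquette", 8),
    ("tell me about", 9), ("going to", 9), ("visiting", 9), ("trip to", 9),
    ("visa", 10), ("vaccination", 10), ("itinerary", 10), ("logistics", 10), ("preparation", 10) ]

def pvRk (p : Nat) : List String := (pvRules.getD p ([], "")).1

def pvCond (p : Nat) (text : String) : Bool := (pvRk p).any (fun k => PySem.Str.isIn k text)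

def pvBest (text : String) : Nat :=
  (List.range text.toList.length).foldl
    (fun best i => pvScanLens text.toList text.toList.length i pvLengths best) pvLabels.length

set_option maxRecDepth 8192 in
lemma pvKwPrio_eq : pvKwPrio = PySem.Dict.mk pvFlat := by decide

set_option maxRecDepth 8192 in
lemma pvLengths_eq : pvLengths = [3, 4, 5, 6, 7, 8, 9, 10, 11, 12, 13, 15, 16, 17, 18] := by decide

lemma pvGet?_iff (s : String) (p : Nat) :
    pvKwPrio.get? s = some p ↔ (s, p) ∈ pvFlat := by
  rw [pvKwPrio_eq]
  have hnd : (PySem.Dict.mk pvFlat).keys.Nodup := by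
    set_option maxRecDepth 8192 in decide
  exact (PySem.Dict.get?_eq_some_iff_mem_items _ _ _ hnd)

set_option maxRecDepth 8192 in
lemma pvFlat_rk : ∀ x ∈ pvFlat, x.1 ∈ pvRk x.2 := by decide

set_option maxRecDepth 8192 in
lemma pvFlat_len : ∀ x ∈ pvFlat, x.1.toList.length ∈ pvLengths ∧ x.1.toList ≠ [] := by decide

set_option maxRecDepth 8192 in
lemma pvRk_flat : ∀ p ∈ List.range 11, ∀ k ∈ pvRk p, ∃ x ∈ pvFlat, x.1 = k ∧ x.2 ≤ p := by decide

lemma pvScanLens_le (tl : List Char) (n i : Nat) :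
    ∀ ls best, pvScanLens tl n i ls best ≤ best := by
  intro ls
  induction ls with
  | nil => intro best; simp [pvScanLens]
  | cons l rest ih =>
    intro best
    simp only [pvScanLens]
    split
    · exact Nat.le_refl _
    · cases h : pvKwPrio.get? (String.ofList ((tl.drop i).take l)) with
      | some p =>
        refine Nat.le_trans (ih _) ?_
        split <;> omega
      | none => exact ih best

lemma pvScanLens_found (tl : List Char) (n i : Nat) :
    ∀ ls, ls.Pairwise (· ≤ ·) → ∀ best ln p, ln ∈ ls → i + ln ≤ n →
      pvKwPrio.get? (String.ofList ((tl.drop i).take ln)) = some p →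
      pvScanLens tl n i ls best ≤ p := by
  intro ls
  induction ls with
  | nil => intro _ best ln p h; simp at h
  | cons l rest ih =>
    intro hpw best ln p hmem hle hget
    rcases List.pairwise_cons.mp hpw with ⟨hlow, hpw'⟩
    rcases List.mem_cons.mp hmem with rfl | hmem'
    · simp only [pvScanLens]
      rw [if_neg (by omega)]
      rw [hget]
      refine Nat.le_trans (pvScanLens_le tl n i rest _) ?_
      split <;> omega
    · have hll : l ≤ ln := hlow ln hmem'
      simp only [pvScanLens]
      rw [if_neg (by omega)]
      cases hg : pvKwPrio.get? (String.ofList ((tl.drop i).take l)) with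
      | some q => exact ih hpw' _ ln p hmem' hle hget
      | none => exact ih hpw' _ ln p hmem' hle hget

lemma pvScanLens_complete (tl : List Char) (n i : Nat) :
    ∀ ls best, pvScanLens tl n i ls best = best ∨
      ∃ ln ∈ ls, i + ln ≤ n ∧
        pvKwPrio.get? (String.ofList ((tl.drop i).take ln)) = some (pvScanLens tl n i ls best) := by
  intro ls
  induction ls with
  | nil => intro best; left; rfl
  | cons l rest ih =>
    intro best
    simp only [pvScanLens]
    split
    · left; rfl
    · rename_i hbreak
      cases hg : pvKwPrio.get? (String.ofList ((tl.drop i).take l)) with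
      | some p =>
        dsimp only
        rcases ih (if p < best then p else best) with heq | ⟨ln, hmem, hle, hget⟩
        · rw [heq]
          by_cases hp : p < best
          · right; exact ⟨l, List.mem_cons_self, by omega, by rw [if_pos hp]; exact hg⟩
          · left; rw [if_neg hp]
        · right; exact ⟨ln, List.mem_cons_of_mem _ hmem, hle, hget⟩
      | none =>
        dsimp only
        rcases ih best with heq | ⟨ln, hmem, hle, hget⟩
        · left; exact heq
        · right; exact ⟨ln, List.mem_cons_of_mem _ hmem, hle, hget⟩

lemma pvFold_le (tl : List Char) (n : Nat) :
    ∀ (l : List Nat) b, l.foldl (fun best i => pvScanLens tl n i pvLengths best) b ≤ b := by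
  intro l
  induction l with
  | nil => intro b; exact Nat.le_refl _
  | cons j rest ih =>
    intro b
    exact Nat.le_trans (ih _) (pvScanLens_le tl n j pvLengths b)

lemma pvFold_found (tl : List Char) (n : Nat) (i p : Nat)
    (h : ∀ b, pvScanLens tl n i pvLengths b ≤ p) :
    ∀ (l : List Nat) b, i ∈ l → l.foldl (fun best i => pvScanLens tl n i pvLengths best) b ≤ p := by
  intro l
  induction l with
  | nil => intro b h'; simp at h'
  | cons j rest ih =>
    intro b hmem
    rcases List.mem_cons.mp hmem with rfl | hmem'
    · exact Nat.le_trans (pvFold_le tl n rest _) (h b)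
    · exact ih _ hmem'

lemma pvFold_complete (tl : List Char) (n : Nat) :
    ∀ (l : List Nat) b, l.foldl (fun best i => pvScanLens tl n i pvLengths best) b = b ∨
      ∃ i ∈ l, ∃ ln ∈ pvLengths, i + ln ≤ n ∧
        pvKwPrio.get? (String.ofList ((tl.drop i).take ln)) =
          some (l.foldl (fun best i => pvScanLens tl n i pvLengths best) b) := by
  intro l
  induction l with
  | nil => intro b; left; rfl
  | cons j rest ih =>
    intro b
    simp only [List.foldl_cons]
    rcases ih (pvScanLens tl n j pvLengths b) with heq | ⟨i, hmem, ln, hln, hle, hget⟩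
    · rw [heq]
      rcases pvScanLens_complete tl n j pvLengths b with heq' | ⟨ln, hln, hle, hget⟩
      · left; exact heq'
      · right; exact ⟨j, List.mem_cons_self, ln, hln, hle, hget⟩
    · right; exact ⟨i, List.mem_cons_of_mem _ hmem, ln, hln, hle, hget⟩

-- if keyword kw (with priority p) occurs in text, the scan finds something ≤ p
lemma pvBest_le (text : String) (kw : String) (p : Nat)
    (hmem : (kw, p) ∈ pvFlat) (hin : PySem.Str.isIn kw text = true) :
    pvBest text ≤ p := by
  have hinf : kw.toList <:+: text.toList := (PySem.Str.isIn_iff_infix kw text).mp hin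
  rcases hinf with ⟨pre, suf, heq⟩
  have hne : kw.toList ≠ [] := (pvFlat_len _ hmem).2
  have hlen : kw.toList.length ∈ pvLengths := (pvFlat_len _ hmem).1
  have hslice : ((text.toList.drop pre.length).take kw.toList.length) = kw.toList := by
    rw [← heq, List.append_assoc, List.drop_left, List.take_left]
  have hbound : pre.length + kw.toList.length ≤ text.toList.length := by
    rw [← heq]; simp
  have hget : pvKwPrio.get? (String.ofList ((text.toList.drop pre.length).take kw.toList.length)) = some p := by
    rw [hslice]
    have hk : String.ofList kw.toList = kw := String.ofList_toList (s := kw)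
    rw [hk]
    exact (pvGet?_iff kw p).mpr hmem
  have hpos : 0 < kw.toList.length := List.length_pos_iff.mpr hne
  have hiran : pre.length ∈ List.range text.toList.length := by
    rw [List.mem_range]; omega
  have hinner : ∀ b, pvScanLens text.toList text.toList.length pre.length pvLengths b ≤ p := by
    intro b
    refine pvScanLens_found text.toList text.toList.length pre.length pvLengths ?_ b
      kw.toList.length p hlen hbound hget
    rw [pvLengths_eq]; decide
  exact pvFold_found text.toList text.toList.length pre.length p hinner _ _ hiran

-- if the scan ends below 11, some keyword of that exact priority occurs in text
lemma pvBest_complete (text : String) (h : pvBest text < 11) :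
    ∃ kw, (kw, pvBest text) ∈ pvFlat ∧ PySem.Str.isIn kw text = true := by
  rcases pvFold_complete text.toList text.toList.length (List.range text.toList.length)
      pvLabels.length with heq | ⟨i, _, ln, _, hle, hget⟩
  · exfalso
    have : pvBest text = pvLabels.length := heq
    rw [this] at h
    simp [pvLabels, pvRules] at h
  · refine ⟨String.ofList ((text.toList.drop i).take ln), (pvGet?_iff _ _).mp hget, ?_⟩
    rw [PySem.Str.isIn_iff_infix]
    rw [String.toList_ofList]
    exact ⟨text.toList.take i, (text.toList.drop i).drop ln, by simp⟩

lemma pvBest_le_eleven (text : String) : pvBest text ≤ 11 := by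
  have := pvFold_le text.toList text.toList.length (List.range text.toList.length)
      pvLabels.length
  have h11 : pvLabels.length = 11 := by
    set_option maxRecDepth 8192 in decide
  rw [← h11]; exact this

-- the first matched rule index is exactly pvBest
lemma pvBest_eq (text : String) (r : Nat) (hr : r < 11)
    (hc : pvCond r text = true) (hprev : ∀ q, q < r → pvCond q text = false) :
    pvBest text = r := by
  have hle : pvBest text ≤ r := by
    rcases List.any_eq_true.mp hc with ⟨k, hk, hin⟩
    rcases pvRk_flat r (List.mem_range.mpr hr) k hk with ⟨x, hx, hx1, hx2⟩
    have := pvBest_le text x.1 x.2 (by rwa [← Prod.mk.eta (p := x)] at hx) (by rwa [hx1])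
    omega
  rcases Nat.lt_or_ge (pvBest text) r with hlt | hge
  · exfalso
    have hb11 : pvBest text < 11 := by omega
    rcases pvBest_complete text hb11 with ⟨kw, hmem, hin⟩
    have hrk : kw ∈ pvRk (pvBest text) := pvFlat_rk (kw, pvBest text) hmem
    have : pvCond (pvBest text) text = true :=
      List.any_eq_true.mpr ⟨kw, hrk, hin⟩
    rw [hprev _ hlt] at this
    exact Bool.false_ne_true this
  · omega

lemma pvBest_general (text : String) (hprev : ∀ q, q < 11 → pvCond q text = false) :
    pvBest text = 11 := by
  have h := pvBest_le_eleven text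
  rcases Nat.lt_or_ge (pvBest text) 11 with hlt | hge
  · exfalso
    rcases pvBest_complete text hlt with ⟨kw, hmem, hin⟩
    have hrk : kw ∈ pvRk (pvBest text) := pvFlat_rk (kw, pvBest text) hmem
    have : pvCond (pvBest text) text = true := List.any_eq_true.mpr ⟨kw, hrk, hin⟩
    rw [hprev _ hlt] at this
    exact Bool.false_ne_true this
  · omega

-- A's branch chain and B's scan agree for every text
lemma pvCore (text : String) :
    (if pvCond 0 text = true then "currency"
     else if pvCond 1 text = true then "weather"
     else if pvCond 2 text = true then "wardrobe"
     else if pvCond 3 text = true then "style"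
     else if pvCond 4 text = true then "destination"
     else if pvCond 5 text = true then "currency"
     else if pvCond 6 text = true then "weather"
     else if pvCond 7 text = true then "wardrobe"
     else if pvCond 8 text = true then "style"
     else if pvCond 9 text = true then "destination"
     else if pvCond 10 text = true then "logistics"
     else "general")
    = (if pvBest text < pvLabels.length then pvLabels.getD (pvBest text) "general" else "general") := by
  cases h0 : pvCond 0 text with
  | true =>
    rw [if_pos rfl, pvBest_eq text 0 (by omega) h0 (by omega)]; decide
  | false =>
  rw [if_neg (by decide)]
  cases h1 : pvCond 1 text with
  | true =>
    rw [if_pos rfl, pvBest_eq text 1 (by omega) h1 (by intro q hq; interval_cases q; exacts [h0])]; decide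
  | false =>
  rw [if_neg (by decide)]
  cases h2 : pvCond 2 text with
  | true =>
    rw [if_pos rfl, pvBest_eq text 2 (by omega) h2 (by intro q hq; interval_cases q; exacts [h0, h1])]; decide
  | false =>
  rw [if_neg (by decide)]
  cases h3 : pvCond 3 text with
  | true =>
    rw [if_pos rfl, pvBest_eq text 3 (by omega) h3 (by intro q hq; interval_cases q; exacts [h0, h1, h2])]; decide
  | false =>
  rw [if_neg (by decide)]
  cases h4 : pvCond 4 text with
  | true =>
    rw [if_pos rfl, pvBest_eq text 4 (by omega) h4 (by intro q hq; interval_cases q; exacts [h0, h1, h2, h3])]; decide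
  | false =>
  rw [if_neg (by decide)]
  cases h5 : pvCond 5 text with
  | true =>
    rw [if_pos rfl, pvBest_eq text 5 (by omega) h5 (by intro q hq; interval_cases q; exacts [h0, h1, h2, h3, h4])]; decide
  | false =>
  rw [if_neg (by decide)]
  cases h6 : pvCond 6 text with
  | true =>
    rw [if_pos rfl, pvBest_eq text 6 (by omega) h6 (by intro q hq; interval_cases q; exacts [h0, h1, h2, h3, h4, h5])]; decide
  | false =>
  rw [if_neg (by decide)]
  cases h7 : pvCond 7 text with
  | true =>
    rw [if_pos rfl, pvBest_eq text 7 (by omega) h7 (by intro q hq; interval_cases q; exacts [h0, h1, h2, h3, h4, h5, h6])]; decide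
  | false =>
  rw [if_neg (by decide)]
  cases h8 : pvCond 8 text with
  | true =>
    rw [if_pos rfl, pvBest_eq text 8 (by omega) h8 (by intro q hq; interval_cases q; exacts [h0, h1, h2, h3, h4, h5, h6, h7])]; decide
  | false =>
  rw [if_neg (by decide)]
  cases h9 : pvCond 9 text with
  | true =>
    rw [if_pos rfl, pvBest_eq text 9 (by omega) h9 (by intro q hq; interval_cases q; exacts [h0, h1, h2, h3, h4, h5, h6, h7, h8])]; decide
  | false =>
  rw [if_neg (by decide)]
  cases h10 : pvCond 10 text with
  | true =>
    rw [if_pos rfl, pvBest_eq text 10 (by omega) h10 (by intro q hq; interval_cases q; exacts [h0, h1, h2, h3, h4, h5, h6, h7, h8, h9])]; decide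
  | false =>
  rw [if_neg (by decide)]
  rw [pvBest_general text (by intro q hq; interval_cases q; exacts [h0, h1, h2, h3, h4, h5, h6, h7, h8, h9, h10])]
  decide

-- ===== VERDICT (by name: the statement is the Claim_ definition above) =====
theorem determine_message_type_py_spec : Claim_equal_determine_message_type_py := by
  intro user_message _
  show determine_message_type_py user_message = determine_message_type_py_alt user_message
  have h : ∀ text : String,
      (if pvCond 0 text = true then "currency"
       else if pvCond 1 text = true then "weather"
       else if pvCond 2 text = true then "wardrobe"
       else if pvCond 3 text = true then "style"
       else if pvCond 4 text = true then "destination"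
       else if pvCond 5 text = true then "currency"
       else if pvCond 6 text = true then "weather"
       else if pvCond 7 text = true then "wardrobe"
       else if pvCond 8 text = true then "style"
       else if pvCond 9 text = true then "destination"
       else if pvCond 10 text = true then "logistics"
       else "general")
      = (if pvBest text < pvLabels.length then pvLabels.getD (pvBest text) "general" else "general") := pvCore
  exact h (PySem.Str.strip (PySem.Str.lower user_message))
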